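-- pv_equiv track=rewrite | github.com/wodydtns/problem_solving | chapter7_03.py | solution
-- ===== SOURCE A (Python) =====
-- from collections import deque
--
-- def solution(card1, card2, goal):
--     answer = []
--     card1_queue = deque(card1)
--     card2_queue = deque(card2)
--     goal = deque(goal)
--
--     while goal:
--         if card1_queue and card1_queue[0]:
--             card1_queue.popleft()
--             goal.popleft()
--         elif card2_queue and card2_queue[0]:
--             card2_queue.popleft()
--             goal.popleft()
--         else:
--             break
--     return "Yes" if not goal else "No"
-- ===== SOURCE B (Python) =====
-- from itertools import takewhile
--
-- def solution(card1, card2, goal):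
--     c1 = sum(1 for _ in takewhile(bool, card1))
--     c2 = sum(1 for _ in takewhile(bool, card2))
--     return "Yes" if c1 + c2 >= len(goal) else "No"
-- ===== Notes on version B (the rewrite author's own statement) =====
-- stated objective: simpler
-- what changed: Replaced the deque pop-simulation loop with two leading-truthy-prefix length counts and a single comparison against len(goal).
import Mathlib
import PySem

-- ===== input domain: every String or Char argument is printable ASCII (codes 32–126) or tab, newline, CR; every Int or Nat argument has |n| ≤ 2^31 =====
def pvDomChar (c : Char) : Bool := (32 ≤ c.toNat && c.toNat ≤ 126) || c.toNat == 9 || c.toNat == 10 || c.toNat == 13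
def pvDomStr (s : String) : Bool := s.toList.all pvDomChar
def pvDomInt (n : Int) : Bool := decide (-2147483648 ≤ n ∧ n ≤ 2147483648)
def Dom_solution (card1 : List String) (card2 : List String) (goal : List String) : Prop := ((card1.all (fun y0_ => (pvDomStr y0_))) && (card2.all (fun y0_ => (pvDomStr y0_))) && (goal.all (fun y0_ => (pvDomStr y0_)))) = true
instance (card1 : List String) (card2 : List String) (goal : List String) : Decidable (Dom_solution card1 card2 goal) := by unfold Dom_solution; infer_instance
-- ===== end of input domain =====

-- B replaces A's deque pop-simulation with two leading-truthy-prefix lengths and one comparison (simpler).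

-- ===== PORT A =====
-- the while loop: pops from whichever queue has a truthy front, consuming goal; returns the remaining goal
def solutionLoop : List String → List String → List String → List String
  | _, _, [] => []
  | c1, c2, x :: gs =>
    match c1 with
    | a :: t1 =>
      if a ≠ "" then solutionLoop t1 c2 gs
      else
        match c2 with
        | b :: t2 => if b ≠ "" then solutionLoop (a :: t1) t2 gs else x :: gs
        | [] => x :: gs
    | [] =>
      match c2 with
      | b :: t2 => if b ≠ "" then solutionLoop [] t2 gs else x :: gs
      | [] => x :: gs

def solution (card1 : List String) (card2 : List String) (goal : List String) : String :=
  if solutionLoop card1 card2 goal = [] then "Yes" else "No"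

-- ===== PORT B =====
def solution_alt (card1 : List String) (card2 : List String) (goal : List String) : String :=
  let c1 := (card1.takeWhile (fun s => s ≠ "")).length
  let c2 := (card2.takeWhile (fun s => s ≠ "")).length
  if c1 + c2 ≥ goal.length then "Yes" else "No"

-- ===== PRECONDITION & SPEC =====
def Spec_solution (card1 : List String) (card2 : List String) (goal : List String) (out : String) : Prop := out = solution_alt card1 card2 goal
instance (card1 : List String) (card2 : List String) (goal : List String) (out : String) : Decidable (Spec_solution card1 card2 goal out) := by unfold Spec_solution; infer_instance

-- ===== CLAIM (what is proved, stated in full; the proofs are below) =====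
def Claim_equal_solution : Prop := ∀ (card1 : List String) (card2 : List String) (goal : List String), Dom_solution card1 card2 goal → Spec_solution card1 card2 goal (solution card1 card2 goal)

-- ===== LEMMAS AND PROOFS =====
theorem solutionLoop_empty_iff (g c1 c2 : List String) :
    solutionLoop c1 c2 g = [] ↔
      (c1.takeWhile (fun s => s ≠ "")).length + (c2.takeWhile (fun s => s ≠ "")).length ≥ g.length := by
  induction g generalizing c1 c2 with
  | nil => simp [solutionLoop]
  | cons x gs ih =>
    cases c1 with
    | cons a t1 =>
      by_cases ha : a = ""
      · cases c2 with
        | cons b t2 =>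
          by_cases hb : b = ""
          · simp [solutionLoop, ha, hb, List.takeWhile]
          · simp only [solutionLoop, ha, hb, if_neg, if_pos, ne_eq, not_true_eq_false,
              not_false_eq_true, ite_true, ite_false]
            try rw [ih]
            simp [List.takeWhile, ha, hb]
            try omega
        | nil => simp [solutionLoop, ha, List.takeWhile]
      · simp only [solutionLoop, ha, ne_eq, not_false_eq_true, ite_true]
        try rw [ih]
        simp [List.takeWhile, ha]
        try omega
    | nil =>
      cases c2 with
      | cons b t2 =>
        by_cases hb : b = ""
        · simp [solutionLoop, hb, List.takeWhile]
        · simp only [solutionLoop, hb, ne_eq, not_false_eq_true, ite_true]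
          try rw [ih]
          simp [List.takeWhile, hb]
          try omega
      | nil => simp [solutionLoop, List.takeWhile]

-- ===== VERDICT (by name: the statement is the Claim_ definition above) =====
theorem solution_spec : Claim_equal_solution := by
  intro card1 card2 goal _
  unfold Spec_solution solution solution_alt
  by_cases h : solutionLoop card1 card2 goal = []
  · rw [if_pos h, if_pos ((solutionLoop_empty_iff goal card1 card2).mp h)]
  · rw [if_neg h, if_neg (fun hg => h ((solutionLoop_empty_iff goal card1 card2).mpr hg))]
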